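-- pv_equiv track=rewrite | github.com/Alan-G-S-Oliveira/BeeCrowd | AD-HOC/1290 - Caixas Muito Especiais.py | verifica_caixas
-- ===== SOURCE A (Python) =====
-- COMBINACOES = [(0, 1, 2), (0, 2, 1), (1, 0, 2), (1, 2, 0), (2, 1, 0), (2, 0, 1)]
--
-- def volume(tamanho: tuple) -> int:
--     return tamanho[0] * tamanho[1] * tamanho[2]
--
-- def verifica_caixas(caixas: int, tamanho: tuple) -> list:
--     saida = []
--     volume_pedido = volume(tamanho)
--     for caixa in caixas:
--
--         volume_estoque = volume(tuple(caixa))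
--         if(volume_estoque >= volume_pedido):
--             for (A, B, C) in COMBINACOES:
--                 if caixa[0] >= tamanho[A] and caixa[1] >= tamanho[B] and caixa[2] >= tamanho[C]:
--                     saida.append(volume_estoque - volume_pedido)
--                     break
--     return saida
-- ===== SOURCE B (Python) =====
-- def verifica_caixas(caixas, tamanho):
--     volume_pedido = tamanho[0] * tamanho[1] * tamanho[2]
--     ts = sorted(tamanho)
--     saida = []
--     for caixa in caixas:
--         volume_estoque = caixa[0] * caixa[1] * caixa[2]
--         cs = sorted(caixa[:3])
--         if volume_estoque >= volume_pedido and cs[0] >= ts[0] and cs[1] >= ts[1] and cs[2] >= ts[2]: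
--             saida.append(volume_estoque - volume_pedido)
--     return saida
-- ===== Notes on version B (the rewrite author's own statement) =====
-- stated objective: simpler
-- what changed: Replaces A's enumeration of the 6 orientation permutations per box with a single sort-and-compare dominance test: sort the box's three dimensions and the requested dimensions and compare componentwise.
-- outside the precondition, e.g. on verifica_caixas([[1, 2]], (1, 1, 1)): A raises IndexError, B raises IndexError
import Mathlib
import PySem

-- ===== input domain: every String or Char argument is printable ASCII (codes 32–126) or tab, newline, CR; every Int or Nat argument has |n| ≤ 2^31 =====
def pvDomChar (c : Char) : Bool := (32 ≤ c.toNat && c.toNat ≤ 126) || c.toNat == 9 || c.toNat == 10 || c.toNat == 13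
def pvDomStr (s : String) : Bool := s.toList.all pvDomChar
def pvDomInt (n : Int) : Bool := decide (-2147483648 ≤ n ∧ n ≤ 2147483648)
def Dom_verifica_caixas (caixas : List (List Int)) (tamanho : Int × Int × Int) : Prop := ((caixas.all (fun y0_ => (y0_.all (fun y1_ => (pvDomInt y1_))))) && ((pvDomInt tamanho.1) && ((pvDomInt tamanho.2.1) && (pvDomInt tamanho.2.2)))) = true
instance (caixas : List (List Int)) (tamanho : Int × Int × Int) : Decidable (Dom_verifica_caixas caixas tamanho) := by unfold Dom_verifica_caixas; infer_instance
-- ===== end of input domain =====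

-- B replaces A's enumeration of the 6 orientations with a sort-both-triples-and-compare
-- componentwise dominance test (objective: simpler).

-- ===== PORT A =====
-- tamanho[i] for i in {0,1,2} (tuple indexing with an in-range literal index)
def tget (t : Int × Int × Int) (i : Nat) : Int :=
  if i = 0 then t.1 else if i = 1 then t.2.1 else t.2.2

def COMBINACOES : List (Nat × Nat × Nat) :=
  [(0, 1, 2), (0, 2, 1), (1, 0, 2), (1, 2, 0), (2, 1, 0), (2, 0, 1)]

-- the inner 'for (A,B,C) in COMBINACOES: if …: append; break' loop: true iff some
-- combination matches (first match breaks; the appended value does not depend on which)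
def fitsLoop (caixa : List Int) (t : Int × Int × Int) : List (Nat × Nat × Nat) → Bool
  | [] => false
  | (A, B, C) :: rest =>
      if PySem.List.pyGetD caixa 0 0 ≥ tget t A ∧ PySem.List.pyGetD caixa 1 0 ≥ tget t B ∧
         PySem.List.pyGetD caixa 2 0 ≥ tget t C then
        true
      else fitsLoop caixa t rest

def verifica_caixas (caixas : List (List Int)) (tamanho : Int × Int × Int) : List Int :=
  let volume_pedido := tamanho.1 * tamanho.2.1 * tamanho.2.2
  caixas.foldl (fun saida caixa =>
    let volume_estoque :=
      PySem.List.pyGetD caixa 0 0 * PySem.List.pyGetD caixa 1 0 * PySem.List.pyGetD caixa 2 0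
    if volume_estoque ≥ volume_pedido then
      if fitsLoop caixa tamanho COMBINACOES then saida ++ [volume_estoque - volume_pedido]
      else saida
    else saida) []

-- ===== PORT B =====
def verifica_caixas_alt (caixas : List (List Int)) (tamanho : Int × Int × Int) : List Int :=
  let volume_pedido := tamanho.1 * tamanho.2.1 * tamanho.2.2
  let ts := PySem.List.sorted [tamanho.1, tamanho.2.1, tamanho.2.2] (fun x => x) false
  caixas.foldl (fun saida caixa =>
    let volume_estoque :=
      PySem.List.pyGetD caixa 0 0 * PySem.List.pyGetD caixa 1 0 * PySem.List.pyGetD caixa 2 0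
    let cs := PySem.List.sorted (PySem.List.slice caixa none (some 3)) (fun x => x) false
    if volume_estoque ≥ volume_pedido ∧ PySem.List.pyGetD cs 0 0 ≥ PySem.List.pyGetD ts 0 0 ∧
       PySem.List.pyGetD cs 1 0 ≥ PySem.List.pyGetD ts 1 0 ∧
       PySem.List.pyGetD cs 2 0 ≥ PySem.List.pyGetD ts 2 0 then
      saida ++ [volume_estoque - volume_pedido]
    else saida) []

-- ===== PRECONDITION & SPEC =====
-- A raises IndexError (it reads caixa[0..2]) on any box with fewer than 3 entries; exactly those inputs are excluded.
def Pre_verifica_caixas (caixas : List (List Int)) (tamanho : Int × Int × Int) : Prop :=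
  ∀ caixa ∈ caixas, 3 ≤ caixa.length
instance (caixas : List (List Int)) (tamanho : Int × Int × Int) : Decidable (Pre_verifica_caixas caixas tamanho) := by unfold Pre_verifica_caixas; infer_instance
def pvWitness_verifica_caixas : List (List Int) × (Int × Int × Int) := ([[3, 1, 2], [5, 5, 5]], (2, 2, 2))

def Spec_verifica_caixas (caixas : List (List Int)) (tamanho : Int × Int × Int) (out : List Int) : Prop := out = verifica_caixas_alt caixas tamanho
instance (caixas : List (List Int)) (tamanho : Int × Int × Int) (out : List Int) : Decidable (Spec_verifica_caixas caixas tamanho out) := by unfold Spec_verifica_caixas; infer_instance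

-- ===== CLAIM (what is proved, stated in full; the proofs are below) =====
def Claim_equal_verifica_caixas : Prop := ∀ (caixas : List (List Int)) (tamanho : Int × Int × Int), Dom_verifica_caixas caixas tamanho → Pre_verifica_caixas caixas tamanho → Spec_verifica_caixas caixas tamanho (verifica_caixas caixas tamanho)

-- ===== LEMMAS AND PROOFS =====

-- PySem's stable sort of a 3-element list, written out as nested comparisons
theorem sorted3 (a b c : Int) :
    PySem.List.sorted [a, b, c] (fun x => x) false =
      if a ≤ b then (if b ≤ c then [a, b, c] else if a ≤ c then [a, c, b] else [c, a, b])
      else (if a ≤ c then [b, a, c] else if b ≤ c then [b, c, a] else [c, b, a]) := by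
  split_ifs with h1 h2 h3 h4 h5
  · exact PySem.List.sorted_id_eq_of_perm_of_pairwise _ _ (List.Perm.refl _)
      (by simp [List.pairwise_cons]; omega)
  · exact PySem.List.sorted_id_eq_of_perm_of_pairwise _ _ (.cons a (.swap b c []))
      (by simp [List.pairwise_cons]; omega)
  · exact PySem.List.sorted_id_eq_of_perm_of_pairwise _ _
      (.trans (.swap a c [b]) (.cons a (.swap b c []))) (by simp [List.pairwise_cons]; omega)
  · exact PySem.List.sorted_id_eq_of_perm_of_pairwise _ _ (.swap a b [c])
      (by simp [List.pairwise_cons]; omega)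
  · exact PySem.List.sorted_id_eq_of_perm_of_pairwise _ _
      (.trans (.cons b (.swap a c [])) (.swap a b [c])) (by simp [List.pairwise_cons]; omega)
  · exact PySem.List.sorted_id_eq_of_perm_of_pairwise _ _ (List.reverse_perm [a, b, c])
      (by simp [List.pairwise_cons]; omega)

-- A's inner loop over COMBINACOES, as a 6-way disjunction (only indices 0,1,2 of the box are read)
theorem fitsLoop_iff (c0 c1 c2 t0 t1 t2 : Int) (rest : List Int) :
    fitsLoop (c0 :: c1 :: c2 :: rest) (t0, t1, t2) COMBINACOES = true ↔
      ((c0 ≥ t0 ∧ c1 ≥ t1 ∧ c2 ≥ t2) ∨ (c0 ≥ t0 ∧ c1 ≥ t2 ∧ c2 ≥ t1) ∨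
       (c0 ≥ t1 ∧ c1 ≥ t0 ∧ c2 ≥ t2) ∨ (c0 ≥ t1 ∧ c1 ≥ t2 ∧ c2 ≥ t0) ∨
       (c0 ≥ t2 ∧ c1 ≥ t1 ∧ c2 ≥ t0) ∨ (c0 ≥ t2 ∧ c1 ≥ t0 ∧ c2 ≥ t1)) := by
  simp only [fitsLoop, COMBINACOES, tget, PySem.List.pyGetD_ofNat']
  norm_num

-- the heart of the equivalence: some orientation of the request fits iff the sorted
-- triples dominate componentwise
theorem dom_iff (c0 c1 c2 t0 t1 t2 : Int) :
      ((c0 ≥ t0 ∧ c1 ≥ t1 ∧ c2 ≥ t2) ∨ (c0 ≥ t0 ∧ c1 ≥ t2 ∧ c2 ≥ t1) ∨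
       (c0 ≥ t1 ∧ c1 ≥ t0 ∧ c2 ≥ t2) ∨ (c0 ≥ t1 ∧ c1 ≥ t2 ∧ c2 ≥ t0) ∨
       (c0 ≥ t2 ∧ c1 ≥ t1 ∧ c2 ≥ t0) ∨ (c0 ≥ t2 ∧ c1 ≥ t0 ∧ c2 ≥ t1)) ↔
      ((PySem.List.sorted [c0, c1, c2] (fun x => x) false).getD 0 0 ≥
        (PySem.List.sorted [t0, t1, t2] (fun x => x) false).getD 0 0 ∧
       (PySem.List.sorted [c0, c1, c2] (fun x => x) false).getD 1 0 ≥
        (PySem.List.sorted [t0, t1, t2] (fun x => x) false).getD 1 0 ∧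
       (PySem.List.sorted [c0, c1, c2] (fun x => x) false).getD 2 0 ≥
        (PySem.List.sorted [t0, t1, t2] (fun x => x) false).getD 2 0) := by
  rw [sorted3, sorted3]
  split_ifs <;> simp only [List.getD_cons_zero, List.getD_cons_succ] <;> simp <;> omega

-- the two per-box step functions agree on every box of length >= 3
theorem step_eq (t0 t1 t2 : Int) (caixa : List Int) (h : 3 <= caixa.length) (saida : List Int) :
    (let volume_estoque :=
      PySem.List.pyGetD caixa 0 0 * PySem.List.pyGetD caixa 1 0 * PySem.List.pyGetD caixa 2 0
     if volume_estoque ≥ t0 * t1 * t2 then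
       if fitsLoop caixa (t0, t1, t2) COMBINACOES then saida ++ [volume_estoque - t0 * t1 * t2]
       else saida
     else saida) =
    (let volume_estoque :=
      PySem.List.pyGetD caixa 0 0 * PySem.List.pyGetD caixa 1 0 * PySem.List.pyGetD caixa 2 0
     let cs := PySem.List.sorted (PySem.List.slice caixa none (some 3)) (fun x => x) false
     let ts := PySem.List.sorted [t0, t1, t2] (fun x => x) false
     if volume_estoque ≥ t0 * t1 * t2 ∧ PySem.List.pyGetD cs 0 0 ≥ PySem.List.pyGetD ts 0 0 ∧
        PySem.List.pyGetD cs 1 0 ≥ PySem.List.pyGetD ts 1 0 ∧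
        PySem.List.pyGetD cs 2 0 ≥ PySem.List.pyGetD ts 2 0 then
       saida ++ [volume_estoque - t0 * t1 * t2]
     else saida) := by
  obtain ⟨c0, c1, c2, rest, rfl⟩ : ∃ c0 c1 c2 rest, caixa = c0 :: c1 :: c2 :: rest := by
    match caixa, h with
    | c0 :: c1 :: c2 :: rest, _ => exact ⟨c0, c1, c2, rest, rfl⟩
  have hslice : PySem.List.slice (c0 :: c1 :: c2 :: rest) none (some 3) = [c0, c1, c2] := by
    simp [PySem.List.slice]
  have hiff := (fitsLoop_iff c0 c1 c2 t0 t1 t2 rest).trans (dom_iff c0 c1 c2 t0 t1 t2)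
  simp only [hslice, PySem.List.pyGetD_ofNat', List.getD_cons_zero, List.getD_cons_succ]
  by_cases hv : c0 * c1 * c2 ≥ t0 * t1 * t2
  · by_cases hf : fitsLoop (c0 :: c1 :: c2 :: rest) (t0, t1, t2) COMBINACOES = true
    · have hd := hiff.mp hf
      simp [hv, hf] at hd ⊢
      exact hd
    · have hnd : ¬ _ := fun hd => hf (hiff.mpr hd)
      simp [hv, hf] at hnd ⊢
      tauto
  · simp [hv]

-- foldl congruence under a per-element condition
theorem foldl_eq_of_step {α β : Type} (f g : β → α → β) (P : α → Prop)
    (xs : List α) (hP : ∀ x ∈ xs, P x) (hstep : ∀ acc x, P x → f acc x = g acc x)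
    (init : β) : xs.foldl f init = xs.foldl g init := by
  induction xs generalizing init with
  | nil => rfl
  | cons x xs ih =>
      rw [List.foldl_cons, List.foldl_cons, hstep init x (hP x (by simp))]
      exact ih (fun y hy => hP y (by simp [hy])) _

-- ===== VERDICT (by name: the statement is the Claim_ definition above) =====
theorem verifica_caixas_spec : Claim_equal_verifica_caixas := by
  intro caixas tamanho _ hpre
  unfold Pre_verifica_caixas at hpre
  obtain ⟨t0, t1, t2⟩ := tamanho
  unfold Spec_verifica_caixas verifica_caixas verifica_caixas_alt
  dsimp only
  exact foldl_eq_of_step _ _ (fun caixa => 3 ≤ caixa.length) caixas hpre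
    (fun acc caixa hc => step_eq t0 t1 t2 caixa hc acc) []
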